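-- pv_equiv track=rewrite | github.com/Drovyng/Python-Game-SpaceDestroyer | main.py | str2meteor
-- ===== SOURCE A (Python) =====
-- def str2meteor(text:str):
--     obj = []
--     y = -1
--     for line in text.split("\n"):
--         y = y + 1
--         x = -1
--         for c in line:
--             x = x + 1
--             if c != ' ':
--                 obj.append([y, x])
--     return obj
-- ===== SOURCE B (Python) =====
-- def str2meteor(text: str):
--     obj = []
--     y = 0
--     x = 0
--     for c in text:
--         if c == '\n':
--             y += 1
--             x = 0
--         else:
--             if c != ' ':
--                 obj.append([y, x])
--             x += 1
--     return obj
-- ===== Notes on version B (the rewrite author's own statement) =====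
-- stated objective: simpler
-- what changed: Replaces the split-into-lines pass plus a nested per-line loop with a single linear scan over the characters that maintains running row/column counters, never materialising the list of lines.
import Mathlib
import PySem

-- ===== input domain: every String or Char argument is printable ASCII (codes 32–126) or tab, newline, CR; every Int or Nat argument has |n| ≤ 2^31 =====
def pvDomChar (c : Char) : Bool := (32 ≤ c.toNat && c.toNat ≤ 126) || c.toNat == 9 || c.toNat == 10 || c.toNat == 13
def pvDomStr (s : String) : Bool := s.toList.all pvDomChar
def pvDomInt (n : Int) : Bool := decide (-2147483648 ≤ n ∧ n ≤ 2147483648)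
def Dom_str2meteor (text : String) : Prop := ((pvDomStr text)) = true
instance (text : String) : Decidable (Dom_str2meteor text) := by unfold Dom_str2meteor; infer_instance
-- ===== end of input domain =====

-- B replaces split("\n") + nested per-line loop by one linear scan with running row/column counters (objective: simpler).

-- ===== PORT A =====
-- inner loop body: x = x + 1; if c != ' ': obj.append([y, x])
def strA_inner (y : Int) (st : List (List Int) × Int) (c : Char) : List (List Int) × Int :=
  let x := st.2 + 1
  (if c ≠ ' ' then st.1 ++ [[y, x]] else st.1, x)

def str2meteor (text : String) : List (List Int) :=
  -- obj = []; y = -1; for line in text.split("\n"): y += 1; x = -1; for c in line: …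
  let st := (PySem.Chars.splitOn text.toList "\n".toList).foldl
    (fun (st : List (List Int) × Int) line =>
      let y := st.2 + 1
      ((line.foldl (strA_inner y) (st.1, -1)).1, y))
    ([], -1)
  st.1

-- ===== PORT B =====
def strB_step (st : List (List Int) × Int × Int) (c : Char) : List (List Int) × Int × Int :=
  if c = '\n' then (st.1, st.2.1 + 1, 0)
  else ((if c ≠ ' ' then st.1 ++ [[st.2.1, st.2.2]] else st.1), st.2.1, st.2.2 + 1)

def str2meteor_alt (text : String) : List (List Int) :=
  (text.toList.foldl strB_step ([], 0, 0)).1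

-- ===== PRECONDITION & SPEC =====
def Spec_str2meteor (text : String) (out : List (List Int)) : Prop := out = str2meteor_alt text
instance (text : String) (out : List (List Int)) : Decidable (Spec_str2meteor text out) := by unfold Spec_str2meteor; infer_instance

-- ===== CLAIM (what is proved, stated in full; the proofs are below) =====
def Claim_equal_str2meteor : Prop := ∀ (text : String), Dom_str2meteor text → Spec_str2meteor text (str2meteor text)

-- ===== LEMMAS AND PROOFS =====

-- reference split with an accumulator, mirroring splitOn.go
def mySplit : List Char → List Char → List (List Char)
  | [], cur => [cur.reverse]
  | c :: r, cur => if c = '\n' then cur.reverse :: mySplit r [] else mySplit r (c :: cur)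

-- the current segment up to the first newline / the segments after each newline
def firstSeg : List Char → List Char
  | [] => []
  | c :: r => if c = '\n' then [] else c :: firstSeg r

def tailLines : List Char → List (List Char)
  | [] => []
  | c :: r => if c = '\n' then firstSeg r :: tailLines r else tailLines r

-- the common specification: coordinates emitted from row y, next column x
def specF : List Char → Int → Int → List (List Int)
  | [], _, _ => []
  | c :: r, y, x =>
    if c = '\n' then specF r (y + 1) 0
    else (if c ≠ ' ' then [[y, x]] else []) ++ specF r y (x + 1)

theorem go_eq_mySplit : ∀ (fuel : Nat) (l cur : List Char) (acc : List (List Char)),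
    l.length < fuel →
    PySem.Chars.splitOn.go ['\n'] fuel l cur acc = acc.reverse ++ mySplit l cur := by
  intro fuel
  induction fuel with
  | zero => intro l cur acc h; omega
  | succ n ih =>
    intro l cur acc h
    cases l with
    | nil => simp [PySem.Chars.splitOn.go, mySplit]
    | cons c r =>
      by_cases hc : c = '\n'
      · subst hc
        rw [PySem.Chars.splitOn.go]
        simp only [List.isPrefixOf, List.length_cons] at *
        simp only [beq_self_eq_true, Bool.true_and, if_true, List.drop_succ_cons,
          List.length_nil, List.drop_zero]
        rw [ih r [] (cur.reverse :: acc) (by simpa using Nat.lt_of_succ_lt_succ h)]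
        simp [mySplit]
      · rw [PySem.Chars.splitOn.go]
        have hpre : List.isPrefixOf ['\n'] (c :: r) = false := by
          simp [List.isPrefixOf, Ne.symm hc]
        simp only [hpre, Bool.false_eq_true, if_false]
        rw [ih r (c :: cur) acc (by simpa using Nat.lt_of_succ_lt_succ h)]
        simp [mySplit, hc]

theorem splitOn_eq_mySplit (cs : List Char) :
    PySem.Chars.splitOn cs ['\n'] = mySplit cs [] := by
  unfold PySem.Chars.splitOn
  exact go_eq_mySplit (cs.length + 1) cs [] [] (by omega)

theorem mySplit_eq (cs : List Char) : ∀ cur,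
    mySplit cs cur = (cur.reverse ++ firstSeg cs) :: tailLines cs := by
  induction cs with
  | nil => intro cur; simp [mySplit, firstSeg, tailLines]
  | cons c r ih =>
    intro cur
    by_cases hc : c = '\n'
    · subst hc; simp [mySplit, firstSeg, tailLines, ih]
    · simp [mySplit, firstSeg, tailLines, hc, ih (c :: cur)]

-- A's nested fold, started mid-line, computes specF
theorem A_fold_eq_specF : ∀ (cs : List Char) (obj : List (List Int)) (y x : Int),
    (((tailLines cs).foldl
        (fun (st : List (List Int) × Int) line =>
          let y' := st.2 + 1
          ((line.foldl (strA_inner y') (st.1, -1)).1, y'))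
        (((firstSeg cs).foldl (strA_inner y) (obj, x)).1, y)).1)
      = obj ++ specF cs y (x + 1) := by
  intro cs
  induction cs with
  | nil => intro obj y x; simp [firstSeg, tailLines, specF]
  | cons c r ih =>
    intro obj y x
    by_cases hc : c = '\n'
    · subst hc
      simp only [firstSeg, tailLines, specF, if_true, List.foldl_nil, List.foldl_cons]
      have := ih obj (y + 1) (-1)
      simpa using this
    · simp only [firstSeg, tailLines, specF, hc, if_false, List.foldl_cons]
      by_cases hs : c = ' '
      · subst hs
        have := ih obj y (x + 1)
        simpa [strA_inner] using this
      · have := ih (obj ++ [[y, x + 1]]) y (x + 1)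
        simp only [strA_inner, if_pos hs]
        simp only [ne_eq] at this ⊢
        rw [this]
        simp

-- B's single fold computes specF
theorem B_fold_eq_specF : ∀ (cs : List Char) (obj : List (List Int)) (y x : Int),
    (cs.foldl strB_step (obj, y, x)).1 = obj ++ specF cs y x := by
  intro cs
  induction cs with
  | nil => intro obj y x; simp [specF]
  | cons c r ih =>
    intro obj y x
    by_cases hc : c = '\n'
    · subst hc; simp [strB_step, specF, ih]
    · by_cases hs : c = ' '
      · subst hs; simp [strB_step, specF, ih]
      · simp [strB_step, specF, hc, hs, ih]

-- ===== VERDICT (by name: the statement is the Claim_ definition above) =====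
theorem str2meteor_spec : Claim_equal_str2meteor := by
  intro text _
  unfold Spec_str2meteor str2meteor str2meteor_alt
  rw [show "\n".toList = ['\n'] from rfl, splitOn_eq_mySplit, mySplit_eq]
  simp only [List.reverse_nil, List.nil_append, List.foldl_cons]
  have hA := A_fold_eq_specF text.toList [] 0 (-1)
  have hB := B_fold_eq_specF text.toList [] 0 0
  simp only [List.nil_append] at hA hB
  simp only [show (-1 : Int) + 1 = 0 from rfl] at hA
  rw [hB]
  simpa using hA
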